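-- pv_equiv track=rewrite | github.com/Dheeraj0053/Advanced-Python-Practice-Questions | Q2.py | minIndexFirstString
-- ===== SOURCE A (Python) =====
-- def minIndexFirstString(str1, str2):
--     max_index = -1
--     for i in range(len(str1)):
--         for j in range(len(str2)):
--             if str1[i] == str2[j]:
--                 if i > max_index:
--                     max_index = i
--                 break
--     return max_index
-- ===== SOURCE B (Python) =====
-- def minIndexFirstString(str1, str2):
--     chars = set(str2)
--     for i in range(len(str1) - 1, -1, -1):
--         if str1[i] in chars:
--             return i
--     return -1
-- ===== Notes on version B (the rewrite author's own statement) =====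
-- stated objective: simpler
-- what changed: Replaces A's forward scan with a nested character-by-character comparison loop and running-max tracking by a reverse scan over str1 with a precomputed set of str2's characters, returning the first hit immediately.
import Mathlib
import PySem

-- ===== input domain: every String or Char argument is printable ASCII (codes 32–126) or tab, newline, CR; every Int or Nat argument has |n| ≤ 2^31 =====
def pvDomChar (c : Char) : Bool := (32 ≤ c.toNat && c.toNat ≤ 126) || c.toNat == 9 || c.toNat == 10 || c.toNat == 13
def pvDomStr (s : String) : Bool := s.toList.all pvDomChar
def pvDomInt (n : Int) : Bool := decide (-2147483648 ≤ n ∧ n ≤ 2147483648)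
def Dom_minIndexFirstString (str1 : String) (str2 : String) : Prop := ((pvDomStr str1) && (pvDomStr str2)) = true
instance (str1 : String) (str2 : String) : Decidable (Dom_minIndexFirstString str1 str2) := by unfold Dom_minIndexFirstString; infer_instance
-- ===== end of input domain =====

-- B replaces A's nested forward scan with running max by a reverse scan with a set and early return; simpler single pass.

-- ===== PORT A =====
-- inner 'for j' loop with break: first matching j updates max_index (if i > max_index) and breaks
def pvInnerA (ch : Char) (l2 : List Char) (i acc : Int) : Int :=
  match l2 with
  | [] => acc
  | c :: rest => if ch = c then (if i > acc then i else acc) else pvInnerA ch rest i acc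

-- outer 'for i in range(len(str1))' loop
def pvOuterA (l1 l2 : List Char) (idxs : List Nat) (acc : Int) : Int :=
  match idxs with
  | [] => acc
  | i :: rest => pvOuterA l1 l2 rest (pvInnerA (l1.getD i ' ') l2 (i : Int) acc)

def minIndexFirstString (str1 : String) (str2 : String) : Int :=
  pvOuterA str1.toList str2.toList (List.range str1.toList.length) (-1)

-- ===== PORT B =====
-- reverse scan: argument n means next index to test is n-1; early return on first hit
def pvRevB (l1 : List Char) (s : PySem.Set Char) : Nat → Int
  | 0 => -1
  | n + 1 => if PySem.Set.contains s (l1.getD n ' ') then (n : Int) else pvRevB l1 s n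

def minIndexFirstString_alt (str1 : String) (str2 : String) : Int :=
  pvRevB str1.toList (PySem.Set.ofList str2.toList) str1.toList.length

-- ===== PRECONDITION & SPEC =====
def Spec_minIndexFirstString (str1 : String) (str2 : String) (out : Int) : Prop := out = minIndexFirstString_alt str1 str2
instance (str1 : String) (str2 : String) (out : Int) : Decidable (Spec_minIndexFirstString str1 str2 out) := by unfold Spec_minIndexFirstString; infer_instance

-- ===== CLAIM (what is proved, stated in full; the proofs are below) =====
def Claim_equal_minIndexFirstString : Prop := ∀ (str1 : String) (str2 : String), Dom_minIndexFirstString str1 str2 → Spec_minIndexFirstString str1 str2 (minIndexFirstString str1 str2)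

-- ===== LEMMAS AND PROOFS =====

theorem pvInnerA_eq (ch : Char) (l2 : List Char) (i acc : Int) :
    pvInnerA ch l2 i acc = if ch ∈ l2 then max i acc else acc := by
  induction l2 with
  | nil => simp [pvInnerA]
  | cons c rest ih =>
    by_cases h : ch = c
    · simp [pvInnerA, h, max_def]
      omega
    · simp [pvInnerA, h, ih]

theorem pvOuterA_append (l1 l2 : List Char) (xs ys : List Nat) (acc : Int) :
    pvOuterA l1 l2 (xs ++ ys) acc = pvOuterA l1 l2 ys (pvOuterA l1 l2 xs acc) := by
  induction xs generalizing acc with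
  | nil => rfl
  | cons x rest ih => simp [pvOuterA, ih]

theorem pvRevB_lt (l1 : List Char) (s : PySem.Set Char) (n : Nat) :
    pvRevB l1 s n < (n : Int) := by
  induction n with
  | zero => simp [pvRevB]
  | succ k ih =>
    simp only [pvRevB]
    split
    · push_cast; omega
    · push_cast; omega

theorem pvMain (l1 l2 : List Char) (n : Nat) :
    pvOuterA l1 l2 (List.range n) (-1) = pvRevB l1 (PySem.Set.ofList l2) n := by
  induction n with
  | zero => rfl
  | succ k ih =>
    rw [List.range_succ, pvOuterA_append, ih]
    have hb := pvRevB_lt l1 (PySem.Set.ofList l2) k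
    have hmem : (PySem.Set.contains (PySem.Set.ofList l2) (l1.getD k ' ') = true) ↔ (l1.getD k ' ') ∈ l2 := by
      simp [PySem.Set.contains, PySem.Set.mem_ofList]
    simp only [pvOuterA, pvInnerA_eq, pvRevB]
    by_cases h : (l1.getD k ' ') ∈ l2
    · rw [if_pos h, if_pos (hmem.mpr h), max_def, if_neg (by omega)]
    · rw [if_neg h, if_neg (fun hc => h (hmem.mp hc))]

-- ===== VERDICT (by name: the statement is the Claim_ definition above) =====
theorem minIndexFirstString_spec : Claim_equal_minIndexFirstString := by
  intro str1 str2 _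
  unfold Spec_minIndexFirstString minIndexFirstString minIndexFirstString_alt
  exact pvMain _ _ _
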